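-- pv_equiv track=rewrite | github.com/Yehuda-Levy923/Project_Euler | Problem78.py | pentagonal_numbers
-- ===== SOURCE A (Python) =====
-- def pentagonal_numbers(limit):
--     k = 1
--     while True:
--         g1 = k * (3*k - 1) // 2
--         g2 = k * (3*k + 1) // 2
--         if g1 > limit:
--             break
--         yield g1
--         if g2 <= limit:
--             yield g2
--         k += 1
-- ===== SOURCE B (Python) =====
-- def pentagonal_numbers(limit):
--     # Every generalized pentagonal number p >= 1 has 24*p + 1 = t*t for a root
--     # t >= 5 with t % 6 in (1, 5), and conversely.  So: find the largest root
--     # x with x*x <= 24*limit + 1 by climbing, then map the closed form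
--     # (t*t - 1) // 24 over the admissible roots t = 5..x in increasing order.
--     if limit < 1:
--         return
--     s = 24 * limit + 1
--     x = 5
--     while (x + 1) * (x + 1) <= s:
--         x += 1
--     for t in range(5, x + 1):
--         if t % 6 in (1, 5):
--             yield (t * t - 1) // 24
-- ===== Notes on version B (the rewrite author's own statement) =====
-- stated objective: alternative
-- what changed: B scans the square roots instead of the index k: it climbs to x = isqrt(24*limit+1), then maps the closed form (t*t-1)//24 over the roots t = 5..x with t % 6 in (1,5), rather than generating the pairs k(3k-1)//2, k(3k+1)//2 with per-value limit tests.
import Mathlib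
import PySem

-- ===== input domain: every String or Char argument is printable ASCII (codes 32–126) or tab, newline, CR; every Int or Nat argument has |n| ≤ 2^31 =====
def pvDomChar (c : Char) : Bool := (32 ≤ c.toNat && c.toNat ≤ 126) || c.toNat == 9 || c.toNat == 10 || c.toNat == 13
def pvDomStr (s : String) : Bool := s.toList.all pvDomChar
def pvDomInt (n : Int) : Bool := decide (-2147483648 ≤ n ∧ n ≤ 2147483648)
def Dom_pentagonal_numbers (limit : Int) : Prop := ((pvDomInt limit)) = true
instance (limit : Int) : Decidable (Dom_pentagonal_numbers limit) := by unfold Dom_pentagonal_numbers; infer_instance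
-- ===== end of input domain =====

-- B replaces A's pair-generation from the index k by a scan over the square roots
-- t of 24*p+1: it climbs to x = isqrt(24*limit+1), then maps the closed form
-- (t*t-1)//24 over the roots t = 5..x with t % 6 in (1,5); objective: alternative.

-- ===== PORT A =====
-- the 'while True' loop of A: yields g1 (and g2 when g2 <= limit) for k = 1, 2, …;
-- the Nat fuel only bounds the iteration count (k ≤ g1, so at most limit+1 steps run)
def pentLoopA (limit : Int) (fuel : Nat) (k : Int) : List Int :=
  match fuel with
  | 0 => []
  | n + 1 =>
    if PySem.Int.floordiv (k * (3*k - 1)) 2 > limit then []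
    else
      PySem.Int.floordiv (k * (3*k - 1)) 2 ::
        (if PySem.Int.floordiv (k * (3*k + 1)) 2 ≤ limit then
          PySem.Int.floordiv (k * (3*k + 1)) 2 :: pentLoopA limit n (k + 1)
        else pentLoopA limit n (k + 1))

def pentagonal_numbers (limit : Int) : List Int := pentLoopA limit (limit + 1).toNat 1

-- ===== PORT B =====
-- B's 'while (x+1)*(x+1) <= s: x += 1' loop; fuel (s-x).toNat bounds the climb (x stays < s)
def pvClimb (s : Int) (fuel : Nat) (x : Int) : Int :=
  match fuel with
  | 0 => x
  | n + 1 => if (x + 1) * (x + 1) ≤ s then pvClimb s n (x + 1) else x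

-- B's 'for t in range(5, x+1): if t % 6 in (1,5): yield (t*t-1)//24'
def pentagonal_numbers_alt (limit : Int) : List Int :=
  if limit < 1 then []
  else
    ((PySem.List.pyRange 5 (pvClimb (24*limit + 1) (24*limit + 1 - 5).toNat 5 + 1) 1).filter
      (fun t => PySem.Int.mod t 6 == 1 || PySem.Int.mod t 6 == 5)).map
      (fun t => PySem.Int.floordiv (t*t - 1) 24)

-- ===== PRECONDITION & SPEC =====
def Spec_pentagonal_numbers (limit : Int) (out : List Int) : Prop := out = pentagonal_numbers_alt limit
instance (limit : Int) (out : List Int) : Decidable (Spec_pentagonal_numbers limit out) := by unfold Spec_pentagonal_numbers; infer_instance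

-- ===== CLAIM (what is proved, stated in full; the proofs are below) =====
def Claim_equal_pentagonal_numbers : Prop := ∀ (limit : Int), Dom_pentagonal_numbers limit → Spec_pentagonal_numbers limit (pentagonal_numbers limit)

-- ===== LEMMAS AND PROOFS =====

theorem pv_lt_succ_sq (r : Int) : r < (r + 1) * (r + 1) := by
  by_cases h : 0 ≤ r
  · nlinarith
  · nlinarith

theorem pv_floordiv_even (m : Int) : PySem.Int.floordiv (2 * m) 2 = m := by
  rw [PySem.Int.floordiv_eq_iff_of_pos (by norm_num : (0:Int) < 2)]
  constructor <;> linarith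

theorem pv_floordiv_cancel24 (m : Int) : PySem.Int.floordiv (24 * m) 24 = m := by
  rw [PySem.Int.floordiv_eq_iff_of_pos (by norm_num : (0:Int) < 24)]
  constructor <;> linarith

theorem pv_two_g1 (k : Int) : 2 * PySem.Int.floordiv (k * (3*k - 1)) 2 = 3*k^2 - k := by
  rcases Int.even_or_odd k with ⟨j, hj⟩ | ⟨j, hj⟩
  · have h2 : k * (3*k - 1) = 2 * (j * (6*j - 1)) := by rw [hj]; ring
    rw [h2, pv_floordiv_even, hj]; ring
  · have h2 : k * (3*k - 1) = 2 * ((2*j + 1) * (3*j + 1)) := by rw [hj]; ring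
    rw [h2, pv_floordiv_even, hj]; ring

theorem pv_two_g2 (k : Int) : 2 * PySem.Int.floordiv (k * (3*k + 1)) 2 = 3*k^2 + k := by
  rcases Int.even_or_odd k with ⟨j, hj⟩ | ⟨j, hj⟩
  · have h2 : k * (3*k + 1) = 2 * (j * (6*j + 1)) := by rw [hj]; ring
    rw [h2, pv_floordiv_even, hj]; ring
  · have h2 : k * (3*k + 1) = 2 * ((2*j + 1) * (3*j + 2)) := by rw [hj]; ring
    rw [h2, pv_floordiv_even, hj]; ring

theorem pv_climb_spec (fuel : Nat) : ∀ (s x : Int), (s - x).toNat ≤ fuel → 0 ≤ x → x * x ≤ s →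
    x ≤ pvClimb s fuel x ∧ 0 ≤ pvClimb s fuel x ∧ pvClimb s fuel x * pvClimb s fuel x ≤ s ∧
      s < (pvClimb s fuel x + 1) * (pvClimb s fuel x + 1) := by
  induction fuel with
  | zero =>
    intro s x hf hx hxs
    have := pv_lt_succ_sq x
    simp only [pvClimb]
    exact ⟨le_refl x, hx, hxs, by omega⟩
  | succ n IH =>
    intro s x hf hx hxs
    have := pv_lt_succ_sq x
    simp only [pvClimb]
    split
    · rename_i h
      exact ⟨by have := (IH s (x + 1) (by omega) (by omega) h).1; omega,
        (IH s (x + 1) (by omega) (by omega) h).2.1,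
        (IH s (x + 1) (by omega) (by omega) h).2.2.1,
        (IH s (x + 1) (by omega) (by omega) h).2.2.2⟩
    · rename_i h
      exact ⟨le_refl x, hx, hxs, by omega⟩

-- B's test 't % 6 in (1,5)' as its Lean Bool, evaluated via the residue
theorem pv_mod_six (t : Int) : PySem.Int.mod t 6 = t % 6 :=
  PySem.Int.mod_eq_emod_of_pos (by norm_num)

theorem pv_pred_false (t : Int) (h1 : PySem.Int.mod t 6 ≠ 1) (h5 : PySem.Int.mod t 6 ≠ 5) :
    (PySem.Int.mod t 6 == 1 || PySem.Int.mod t 6 == 5) = false := by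
  rw [pv_mod_six] at h1 h5
  simp [h1, h5]

-- squares are monotone on the nonnegative integers
theorem pv_sq_lt (a b : Int) (ha : 0 ≤ a) (hb : 0 ≤ b) (h : a * a < b * b) : a < b := by
  by_contra h'
  have hba : b ≤ a := by omega
  have := Int.mul_le_mul hba hba hb ha
  omega

-- a run of inadmissible roots contributes nothing to the filter
theorem pv_filter_skip (p : Int → Bool) (b c : Int) : ∀ (n : Nat) (a : Int),
    (c - a).toNat ≤ n → a ≤ c → (∀ t, a ≤ t → t < c → p t = false) →
    (PySem.List.pyRange a b 1).filter p = (PySem.List.pyRange c b 1).filter p := by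
  intro n
  induction n with
  | zero =>
    intro a hn hac _
    have : a = c := by omega
    rw [this]
  | succ n IH =>
    intro a hn hac hbad
    by_cases heq : a = c
    · rw [heq]
    · by_cases hab : a < b
      · rw [PySem.List.pyRange_one_cons hab, List.filter_cons,
          hbad a (le_refl a) (by omega)]
        exact IH (a + 1) (by omega) (by omega) (fun t h1 h2 => hbad t (by omega) h2)
      · rw [PySem.List.pyRange_one_eq_nil (by omega),
          PySem.List.pyRange_one_eq_nil (by omega : b ≤ c)]

-- the main correspondence: A's loop from k produces exactly the closed forms of the
-- admissible roots t in [6k-1, x]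
theorem pv_mainA (limit x : Int) (hx0 : 0 ≤ x) (hxle : x * x ≤ 24*limit + 1)
    (hxgt : 24*limit + 1 < (x + 1) * (x + 1)) :
    ∀ (fa : Nat) (k : Int), 1 ≤ k → (limit + 1 - k).toNat ≤ fa →
    pentLoopA limit fa k =
      ((PySem.List.pyRange (6*k - 1) (x + 1) 1).filter
        (fun t => PySem.Int.mod t 6 == 1 || PySem.Int.mod t 6 == 5)).map
        (fun t => PySem.Int.floordiv (t*t - 1) 24) := by
  intro fa
  induction fa with
  | zero =>
    intro k hk hfa
    have hg1 := pv_two_g1 k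
    have hkg1 : k ≤ PySem.Int.floordiv (k * (3*k - 1)) 2 := by nlinarith
    have hs1 : (6*k - 1) * (6*k - 1) = 24 * PySem.Int.floordiv (k * (3*k - 1)) 2 + 1 := by
      linear_combination (-12) * hg1
    have hlk : limit < k := by omega
    -- limit < k ≤ g1 so (6k-1)^2 > 24*limit+1 ≥ x^2: the root range is empty
    have hxr : x < 6*k - 1 := pv_sq_lt x (6*k - 1) hx0 (by omega) (by omega)
    rw [PySem.List.pyRange_one_eq_nil (by omega)]
    simp [pentLoopA]
  | succ m IH =>
    intro k hk hfa
    have hg1 := pv_two_g1 k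
    have hg2 := pv_two_g2 k
    have hkg1 : k ≤ PySem.Int.floordiv (k * (3*k - 1)) 2 := by nlinarith
    have hs1 : (6*k - 1) * (6*k - 1) = 24 * PySem.Int.floordiv (k * (3*k - 1)) 2 + 1 := by
      linear_combination (-12) * hg1
    have hs2 : (6*k + 1) * (6*k + 1) = 24 * PySem.Int.floordiv (k * (3*k + 1)) 2 + 1 := by
      linear_combination (-12) * hg2
    simp only [pentLoopA]
    by_cases hstop : PySem.Int.floordiv (k * (3*k - 1)) 2 > limit
    · -- A stops: (6k-1)^2 > 24*limit+1 ≥ x^2 so the range is empty as well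
      have hxr : x < 6*k - 1 := pv_sq_lt x (6*k - 1) hx0 (by omega) (by omega)
      rw [if_pos hstop, PySem.List.pyRange_one_eq_nil (by omega)]
      simp
    · rw [if_neg hstop]
      have hstop' : PySem.Int.floordiv (k * (3*k - 1)) 2 ≤ limit := not_lt.mp hstop
      -- g1 ≤ limit: 6k-1 is in range and admissible
      have hx1 : 6*k - 1 ≤ x := by
        have := pv_sq_lt (6*k - 1) (x + 1) (by omega) (by omega) (by omega)
        omega
      have hm1 : PySem.Int.mod (6*k - 1) 6 = 5 := by rw [pv_mod_six]; omega
      have hf1 : PySem.Int.floordiv ((6*k - 1) * (6*k - 1) - 1) 24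
          = PySem.Int.floordiv (k * (3*k - 1)) 2 := by
        rw [show (6*k - 1) * (6*k - 1) - 1 = 24 * PySem.Int.floordiv (k * (3*k - 1)) 2 by omega,
          pv_floordiv_cancel24]
      rw [PySem.List.pyRange_one_cons (by omega : 6*k - 1 < x + 1)]
      simp only [List.filter_cons, hm1]
      rw [if_pos (show ((5:ℤ) == 1 || (5:ℤ) == 5) = true by decide), List.map_cons, hf1]
      congr 1
      rw [show 6*k - 1 + 1 = 6*k by ring]
      by_cases hgl : PySem.Int.floordiv (k * (3*k + 1)) 2 ≤ limit
      · rw [if_pos hgl]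
        have hx2 : 6*k + 1 ≤ x := by
          have := pv_sq_lt (6*k + 1) (x + 1) (by omega) (by omega) (by omega)
          omega
        -- skip the sole bad root 6k, take 6k+1, then skip 6k+2..6k+4
        rw [pv_filter_skip
          (fun t => PySem.Int.mod t 6 == 1 || PySem.Int.mod t 6 == 5) (x + 1) (6*k + 1) 1
          (6*k) (by omega) (by omega)
          (fun t h1 h2 => pv_pred_false t (by rw [pv_mod_six]; omega) (by rw [pv_mod_six]; omega))]
        have hm2 : PySem.Int.mod (6*k + 1) 6 = 1 := by rw [pv_mod_six]; omega
        have hf2 : PySem.Int.floordiv ((6*k + 1) * (6*k + 1) - 1) 24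
            = PySem.Int.floordiv (k * (3*k + 1)) 2 := by
          rw [show (6*k + 1) * (6*k + 1) - 1 = 24 * PySem.Int.floordiv (k * (3*k + 1)) 2 by omega,
            pv_floordiv_cancel24]
        rw [PySem.List.pyRange_one_cons (by omega : 6*k + 1 < x + 1)]
        simp only [List.filter_cons, hm2]
        rw [if_pos (show ((1:ℤ) == 1 || (1:ℤ) == 5) = true by decide), List.map_cons, hf2]
        congr 1
        rw [show 6*k + 1 + 1 = 6*k + 2 by ring]
        rw [pv_filter_skip
          (fun t => PySem.Int.mod t 6 == 1 || PySem.Int.mod t 6 == 5) (x + 1) (6*k + 5) 3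
          (6*k + 2) (by omega) (by omega)
          (fun t h1 h2 => pv_pred_false t (by rw [pv_mod_six]; omega) (by rw [pv_mod_six]; omega))]
        have hrec := IH (k + 1) (by omega) (by omega)
        rw [show 6*(k + 1) - 1 = 6*k + 5 by ring] at hrec
        exact hrec
      · rw [if_neg hgl]
        have hgl' : limit < PySem.Int.floordiv (k * (3*k + 1)) 2 := not_le.mp hgl
        -- g2 > limit: x < 6k+1, the rest of the range holds only the bad root 6k
        have hx2 : x < 6*k + 1 := pv_sq_lt x (6*k + 1) hx0 (by omega) (by omega)
        rw [pv_filter_skip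
          (fun t => PySem.Int.mod t 6 == 1 || PySem.Int.mod t 6 == 5) (x + 1) (x + 1)
          ((x + 1 - 6*k).toNat) (6*k) (le_refl _) (by omega)
          (fun t h1 h2 => pv_pred_false t (by rw [pv_mod_six]; omega) (by rw [pv_mod_six]; omega)),
          PySem.List.pyRange_one_eq_nil (le_refl _)]
        have hrec := IH (k + 1) (by omega) (by omega)
        rw [show 6*(k + 1) - 1 = 6*k + 5 by ring,
          PySem.List.pyRange_one_eq_nil (by omega : x + 1 ≤ 6*k + 5)] at hrec
        simpa using hrec

-- ===== VERDICT (by name: the statement is the Claim_ definition above) =====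
theorem pentagonal_numbers_spec : Claim_equal_pentagonal_numbers := by
  intro limit _
  unfold Spec_pentagonal_numbers pentagonal_numbers pentagonal_numbers_alt
  by_cases hl : limit < 1
  · rw [if_pos hl]
    rcases (by omega : limit < 0 ∨ limit = 0) with h | h
    · rw [show (limit + 1).toNat = 0 by omega]
      simp [pentLoopA]
    · subst h; decide
  · rw [if_neg hl]
    have hl' : 1 ≤ limit := not_lt.mp hl
    obtain ⟨h5, h0, hle, hgt⟩ := pv_climb_spec (24*limit + 1 - 5).toNat (24*limit + 1) 5
      (le_refl _) (by norm_num) (by omega)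
    have := pv_mainA limit (pvClimb (24*limit + 1) (24*limit + 1 - 5).toNat 5)
      (by omega) hle hgt (limit + 1).toNat 1 (by norm_num) (by omega)
    rw [show 6*(1:Int) - 1 = 5 by norm_num] at this
    exact this
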